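-- pv_equiv track=rewrite | github.com/dmc1778/test | run.py | get_patches
-- ===== SOURCE A (Python) =====
-- def get_patches(splitted_lines):
--     super_temp = []
--     j = 0
--     indices = []
--     while j < len(splitted_lines):
--         if splitted_lines[j][0] == '@':
--             indices.append(j)
--         j += 1
--
--     if len(indices) == 1:
--         for i, item in enumerate(splitted_lines):
--             if i != 0:
--                 super_temp.append(item)
--         super_temp = [super_temp]
--     else:
--         i = 0
--         j = 1
--         while True:
--             temp = []
--             for row in range(indices[i]+1, indices[j]):
--                 temp.append(splitted_lines[row])
--             super_temp.append(temp)
--             if j == len(indices)-1: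
--                 temp = []
--                 for row in range(indices[j]+1, len(splitted_lines)):
--                     temp.append(splitted_lines[row])
--                 super_temp.append(temp)
--                 break
--             i+= 1
--             j+= 1
--     return super_temp
-- ===== SOURCE B (Python) =====
-- def get_patches(splitted_lines):
--     blocks = []
--     current = None
--     for line in splitted_lines:
--         if line[0] == '@':
--             if current is not None:
--                 blocks.append(current)
--             current = []
--         elif current is not None:
--             current.append(line)
--     if current is not None:
--         blocks.append(current)
--     return blocks
-- ===== Notes on version B (the rewrite author's own statement) =====
-- stated objective: simpler
-- what changed: Replaced the marker-index table plus range-slicing loops with a single streaming pass that flushes the current block whenever a line starts with '@'.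
-- intended difference: On inputs with exactly one '@'-marker line that is not the first line, A returns [lines[1:]] (keeping the marker line and pre-marker content except line 0) while B returns the content after the marker, which is the intended segmentation A itself uses for two or more markers. — e.g. on get_patches(["a", "@x", "b"]): A returns [["@x", "b"]], B returns [["b"]]
import Mathlib
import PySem

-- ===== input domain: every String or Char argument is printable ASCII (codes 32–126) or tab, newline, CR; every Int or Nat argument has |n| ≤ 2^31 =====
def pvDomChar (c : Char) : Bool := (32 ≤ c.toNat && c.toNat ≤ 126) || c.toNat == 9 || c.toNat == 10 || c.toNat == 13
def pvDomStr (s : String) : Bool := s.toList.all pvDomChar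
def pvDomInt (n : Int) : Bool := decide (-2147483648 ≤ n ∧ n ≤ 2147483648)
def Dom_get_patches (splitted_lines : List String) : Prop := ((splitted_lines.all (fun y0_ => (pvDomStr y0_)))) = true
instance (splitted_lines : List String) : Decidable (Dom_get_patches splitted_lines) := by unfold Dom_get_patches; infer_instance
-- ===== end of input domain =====

-- B replaces A's marker-index table + range slicing with one streaming pass (objective: simpler).

-- ===== PORT A =====
-- indices-building while loop; splitted_lines[j][0] is s.toList.head? (exact: Pre_ excludes empty lines)
def gpIndices (l : List String) : List Nat :=
  (List.range l.length).foldl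
    (fun acc j => if (l.getD j "").toList.head? == some '@' then acc ++ [j] else acc) []

-- 'for row in range(a, b): temp.append(splitted_lines[row])'
def gpSeg (l : List String) (a b : Nat) : List String :=
  (List.range' a (b - a)).foldl (fun acc r => acc ++ [l.getD r ""]) []

-- the 'while True' loop; fuel bounds the iterations (inside Pre_ the loop always breaks first)
def gpLoop (l : List String) (idx : List Nat) : Nat → Nat → Nat → List (List String) → List (List String)
  | 0, _, _, acc => acc
  | fuel+1, i, j, acc =>
    let acc' := acc ++ [gpSeg l (idx.getD i 0 + 1) (idx.getD j 0)]
    if j == idx.length - 1 then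
      acc' ++ [gpSeg l (idx.getD j 0 + 1) l.length]
    else
      gpLoop l idx fuel (i+1) (j+1) acc'

def get_patches (splitted_lines : List String) : List (List String) :=
  let idx := gpIndices splitted_lines
  if idx.length == 1 then
    [(PySem.List.enumerate splitted_lines).foldl
      (fun acc p => if p.1 ≠ 0 then acc ++ [p.2] else acc) []]
  else
    gpLoop splitted_lines idx idx.length 0 1 []

-- ===== PORT B =====
def altStep (st : List (List String) × Option (List String)) (line : String) :
    List (List String) × Option (List String) :=
  if line.toList.head? == some '@' then
    (match st.2 with
     | some c => st.1 ++ [c]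
     | none => st.1, some [])
  else
    match st.2 with
    | some c => (st.1, some (c ++ [line]))
    | none => st

-- the final 'if current is not None: blocks.append(current)'
def altFin (st : List (List String) × Option (List String)) : List (List String) :=
  match st.2 with
  | some c => st.1 ++ [c]
  | none => st.1

def get_patches_alt (splitted_lines : List String) : List (List String) :=
  altFin (splitted_lines.foldl altStep ([], none))

-- ===== PRECONDITION & SPEC =====
-- Pre_ excludes exactly the inputs where A raises IndexError: an empty-string line
-- (splitted_lines[j][0]) or no '@'-marker line at all (indices[0]).
def Pre_get_patches (splitted_lines : List String) : Prop :=
  (∀ s ∈ splitted_lines, s.toList ≠ []) ∧ (∃ s ∈ splitted_lines, s.toList.head? = some '@')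
instance (splitted_lines : List String) : Decidable (Pre_get_patches splitted_lines) := by
  unfold Pre_get_patches; infer_instance
def pvWitness_get_patches : List String := ["@a", "b"]

-- On inputs with exactly one '@'-marker line that is not the first line, A returns [lines[1:]]
-- (keeping the marker line and the pre-marker content except line 0) while B returns the content
-- after the marker, which is the intended segmentation A itself performs for two or more markers.
def D_get_patches (splitted_lines : List String) : Prop :=
  splitted_lines.countP (fun s => s.toList.head? == some '@') = 1 ∧
  (∀ s ∈ splitted_lines.take 1, ¬ (s.toList.head? = some '@'))
instance (splitted_lines : List String) : Decidable (D_get_patches splitted_lines) := by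
  unfold D_get_patches; infer_instance

def Spec_get_patches (splitted_lines : List String) (out : List (List String)) : Prop :=
  ¬ D_get_patches splitted_lines → out = get_patches_alt splitted_lines
instance (splitted_lines : List String) (out : List (List String)) :
    Decidable (Spec_get_patches splitted_lines out) := by unfold Spec_get_patches; infer_instance

def pvDiffWitness_get_patches : List String := ["a", "@x", "b"]
def pvDiffWitnessOut_get_patches : (List (List String)) × (List (List String)) :=
  ([["@x", "b"]], [["b"]])

-- ===== CLAIM (what is proved, stated in full; the proofs are below) =====
def Claim_unchanged_get_patches : Prop := ∀ (splitted_lines : List String), Dom_get_patches splitted_lines → Pre_get_patches splitted_lines → Spec_get_patches splitted_lines (get_patches splitted_lines)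
def Claim_changed_get_patches : Prop := Dom_get_patches (pvDiffWitness_get_patches) ∧ Pre_get_patches (pvDiffWitness_get_patches) ∧ D_get_patches (pvDiffWitness_get_patches) ∧ get_patches (pvDiffWitness_get_patches) = pvDiffWitnessOut_get_patches.1 ∧ get_patches_alt (pvDiffWitness_get_patches) = pvDiffWitnessOut_get_patches.2 ∧ pvDiffWitnessOut_get_patches.1 ≠ pvDiffWitnessOut_get_patches.2
def Claim_exact_get_patches : Prop := ∀ (splitted_lines : List String), Dom_get_patches splitted_lines → Pre_get_patches splitted_lines → D_get_patches splitted_lines → get_patches splitted_lines ≠ get_patches_alt splitted_lines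

-- ===== LEMMAS AND PROOFS =====

def mk' (s : String) : Bool := s.toList.head? == some '@'

-- marker positions, recursively
def mposR : List String → List Nat
  | [] => []
  | x :: xs => (if mk' x then [0] else []) ++ (mposR xs).map (· + 1)

-- B's streaming tail: the blocks produced once the first marker has been passed
def spGo (cur : List String) : List String → List (List String)
  | [] => [cur]
  | x :: xs => if mk' x then cur :: spGo [] xs else spGo (cur ++ [x]) xs

-- A's segments, as gpSeg slices between consecutive indices
def segsOf (l : List String) : List Nat → List (List String)
  | [] => []
  | [p] => [gpSeg l (p+1) l.length]
  | p :: q :: ps => gpSeg l (p+1) q :: segsOf l (q :: ps)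

theorem mk_getD (l : List String) (j : Nat) (h : j < l.length) :
    mk' (l.getD j "") = mk' (l[j]) := by
  simp [List.getD, List.getElem?_eq_getElem h]

theorem filter_range_eq_mposR (l : List String) :
    (List.range l.length).filter (fun j => (l.getD j "").toList.head? == some '@') = mposR l := by
  induction l with
  | nil => simp [mposR]
  | cons x xs ih =>
    simp only [List.length_cons]
    rw [List.range_succ_eq_map, List.filter_cons, List.filter_map]
    have hfun : ((fun j => ((x :: xs).getD j "").toList.head? == some '@') ∘ Nat.succ)
        = (fun j => (xs.getD j "").toList.head? == some '@') := funext (fun j => rfl)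
    rw [hfun, ih]
    simp only [mposR]
    have hcond : (((x :: xs).getD 0 "").toList.head? == some '@') = mk' x := rfl
    rw [hcond]
    by_cases hx : mk' x = true
    · rw [if_pos hx, if_pos hx]
      simp [Nat.succ_eq_add_one]
    · rw [if_neg hx, if_neg hx]
      simp [Nat.succ_eq_add_one]

theorem gpIndices_eq_mposR (l : List String) : gpIndices l = mposR l := by
  unfold gpIndices
  rw [PySem.List.foldl_append_if_eq_filter]
  rw [List.nil_append]
  exact filter_range_eq_mposR l

theorem mpos_mem (l : List String) (j : Nat) :
    j ∈ mposR l ↔ (j < l.length ∧ mk' (l.getD j "") = true) := by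
  induction l generalizing j with
  | nil => simp [mposR]
  | cons x xs ih =>
    simp only [mposR, List.mem_append, List.mem_map]
    cases j with
    | zero =>
      by_cases hx : mk' x <;> simp [hx, List.getD]
    | succ j =>
      have hgd : ((x :: xs).getD (j+1) "") = xs.getD j "" := rfl
      rw [hgd]
      constructor
      · rintro (h | ⟨a, ha, hEq⟩)
        · by_cases hx : mk' x <;> simp [hx] at h
        · have haj : a = j := by omega
          subst haj
          have := (ih a).1 ha
          exact ⟨by simp; omega, this.2⟩
      · rintro ⟨hlen, hm⟩
        exact Or.inr ⟨j, (ih j).2 ⟨by simp at hlen; omega, hm⟩, rfl⟩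

theorem mpos_sorted (l : List String) : (mposR l).Pairwise (· < ·) := by
  induction l with
  | nil => simp [mposR]
  | cons x xs ih =>
    simp only [mposR]
    by_cases hx : mk' x
    · simp only [hx, if_pos, List.singleton_append]
      rw [List.pairwise_cons]
      constructor
      · intro a ha
        obtain ⟨b, _, rfl⟩ := List.mem_map.1 ha
        omega
      · exact (List.pairwise_map).2 (ih.imp (by omega))
    · simp only [hx, Bool.false_eq_true, if_neg, not_false_iff, List.nil_append]
      exact (List.pairwise_map).2 (ih.imp (by omega))

theorem mpos_length (l : List String) :
    (mposR l).length = l.countP (fun s => s.toList.head? == some '@') := by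
  induction l with
  | nil => simp [mposR]
  | cons x xs ih =>
    simp only [mposR, List.length_append, List.length_map, ih, List.countP_cons]
    have hcond : (x.toList.head? == some '@') = mk' x := rfl
    rw [hcond]
    by_cases hx : mk' x = true
    · rw [if_pos hx, if_pos hx]
      simp; omega
    · rw [if_neg hx, if_neg hx]
      simp

theorem mpos_nil_iff (l : List String) :
    mposR l = [] ↔ ∀ x ∈ l, mk' x = false := by
  induction l with
  | nil => simp [mposR]
  | cons x xs ih =>
    simp only [mposR, List.append_eq_nil_iff, List.map_eq_nil_iff, ih]
    constructor
    · rintro ⟨h1, h2⟩ y hy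
      rcases List.mem_cons.1 hy with rfl | hy
      · by_cases hx : mk' y
        · simp [hx] at h1
        · simpa using hx
      · exact h2 y hy
    · intro h
      refine ⟨?_, fun y hy => h y (List.mem_cons_of_mem _ hy)⟩
      have := h x (List.mem_cons_self)
      simp [this]

-- membership in a drop/take window as an absolute index
theorem mem_drop_idx (l : List String) (a : Nat) (x : String) (hx : x ∈ l.drop a) :
    ∃ j, a ≤ j ∧ ∃ h : j < l.length, x = l[j] := by
  obtain ⟨i, hi, hget⟩ := List.mem_iff_getElem.1 hx
  have hlen : a + i < l.length := by
    rw [List.length_drop] at hi; omega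
  refine ⟨a + i, by omega, hlen, ?_⟩
  rw [← hget]
  rw [List.getElem_drop]

theorem mem_drop_take_idx (l : List String) (a c : Nat) (x : String)
    (hx : x ∈ (l.drop a).take c) :
    ∃ j, a ≤ j ∧ j < a + c ∧ ∃ h : j < l.length, x = l[j] := by
  obtain ⟨i, hi, hget⟩ := List.mem_iff_getElem.1 hx
  have hi' : i < c ∧ a + i < l.length := by
    rw [List.length_take, List.length_drop] at hi
    omega
  refine ⟨a + i, by omega, by omega, by omega, ?_⟩
  rw [← hget]
  rw [List.getElem_take, List.getElem_drop]

-- a marker element of l sits at a position of mposR l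
theorem marker_pos (l : List String) (j : Nat) (h : j < l.length) (hm : mk' (l[j]) = true) :
    j ∈ mposR l := (mpos_mem l j).2 ⟨h, by rw [mk_getD l j h]; exact hm⟩

-- gpSeg as drop/take
theorem foldl_append_singleton {α β : Type} (f : α → β) (xs : List α) (acc : List β) :
    xs.foldl (fun a x => a ++ [f x]) acc = acc ++ xs.map f := by
  induction xs generalizing acc with
  | nil => simp
  | cons x xs ih => simp [ih]

theorem range'_map_getD (l : List String) :
    ∀ (c a : Nat), a + c ≤ l.length →
    (List.range' a c).map (fun r => l.getD r "") = (l.drop a).take c := by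
  intro c
  induction c with
  | zero => simp
  | succ c ih =>
    intro a h
    have ha : a < l.length := by omega
    rw [List.range'_succ]
    simp only [List.map_cons]
    rw [List.drop_eq_getElem_cons ha]
    simp only [List.take_succ_cons]
    rw [ih (a+1) (by omega)]
    congr 1
    simp [List.getD, List.getElem?_eq_getElem ha]

theorem gpSeg_eq (l : List String) (a b : Nat) (hb : b ≤ l.length) :
    gpSeg l a b = (l.drop a).take (b - a) := by
  unfold gpSeg
  rw [foldl_append_singleton (fun r => l.getD r "")]
  rw [List.nil_append]
  by_cases hab : a ≤ b
  · exact range'_map_getD l (b - a) a (by omega)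
  · have h0 : b - a = 0 := by omega
    simp [h0]

theorem gpSeg_tail (l : List String) (p : Nat) :
    gpSeg l (p+1) l.length = l.drop (p+1) := by
  rw [gpSeg_eq l (p+1) l.length le_rfl]
  exact List.take_of_length_le (by simp)

-- spGo structure
theorem spGo_nomark (xs : List String) (h : ∀ x ∈ xs, mk' x = false) :
    ∀ cur, spGo cur xs = [cur ++ xs] := by
  induction xs with
  | nil => simp [spGo]
  | cons x xs ih =>
    intro cur
    have hx := h x (List.mem_cons_self)
    simp only [spGo, hx, Bool.false_eq_true, if_neg, not_false_iff]
    rw [ih (fun y hy => h y (List.mem_cons_of_mem _ hy))]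
    simp

theorem spGo_split (u : List String) (hu : ∀ x ∈ u, mk' x = false)
    (m : String) (hm : mk' m = true) (v : List String) :
    ∀ cur, spGo cur (u ++ m :: v) = (cur ++ u) :: spGo [] v := by
  induction u with
  | nil => intro cur; simp [spGo, hm]
  | cons x xs ih =>
    intro cur
    have hx := hu x (List.mem_cons_self)
    simp only [List.cons_append, spGo, hx, Bool.false_eq_true, if_neg, not_false_iff]
    rw [ih (fun y hy => hu y (List.mem_cons_of_mem _ hy))]
    simp

-- B's fold structure
theorem altFold_some (xs : List String) :
    ∀ (blocks : List (List String)) (cur : List String),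
      altFin (xs.foldl altStep (blocks, some cur)) = blocks ++ spGo cur xs := by
  induction xs with
  | nil => intro blocks cur; simp [altFin, spGo]
  | cons x xs ih =>
    intro blocks cur
    by_cases hx : mk' x
    · simp only [mk'] at hx
      simp only [List.foldl_cons, altStep, hx, if_pos, spGo, mk', ih]
      simp
    · simp only [mk'] at hx
      simp only [List.foldl_cons, altStep, hx, Bool.false_eq_true, if_neg, not_false_iff,
        spGo, mk', ih]

theorem altFold_none (u : List String) (hu : ∀ x ∈ u, mk' x = false) :
    ∀ v : List String, (u ++ v).foldl altStep ([], none) = v.foldl altStep ([], none) := by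
  induction u with
  | nil => intro v; rfl
  | cons x xs ih =>
    intro v
    have hx := hu x (List.mem_cons_self)
    simp only [mk'] at hx
    simp only [List.cons_append, List.foldl_cons, altStep, hx, Bool.false_eq_true, if_neg,
      not_false_iff]
    exact ih (fun y hy => hu y (List.mem_cons_of_mem _ hy)) v

theorem alt_main (l : List String) (p : Nat) (hp : p < l.length)
    (hfree : ∀ x ∈ l.take p, mk' x = false) (hm : mk' (l[p]) = true) :
    get_patches_alt l = spGo [] (l.drop (p+1)) := by
  unfold get_patches_alt
  conv_lhs => rw [← List.take_append_drop p l]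
  rw [altFold_none (l.take p) hfree]
  rw [List.drop_eq_getElem_cons hp]
  simp only [mk'] at hm
  simp only [List.foldl_cons, altStep, hm, if_pos]
  exact altFold_some (l.drop (p+1)) [] []

-- no marker position of l lies strictly above the last index of idx ⇒ tail is marker-free
theorem drop_free_of_no_pos (l : List String) (p : Nat)
    (h : ∀ j, p < j → j < l.length → mk' (l.getD j "") = false) :
    ∀ x ∈ l.drop (p+1), mk' x = false := by
  intro x hx
  obtain ⟨j, hj1, hj2, rfl⟩ := mem_drop_idx l (p+1) x hx
  have := h j (by omega) hj2
  rw [mk_getD l j hj2] at this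
  exact this

-- MAIN bridge: streaming tail = A's slice segments
theorem main_bridge (l : List String) :
    ∀ (ps : List Nat) (p : Nat),
      (p :: ps).Pairwise (· < ·) →
      (∀ j, p < j → (j ∈ ps ↔ (j < l.length ∧ mk' (l.getD j "") = true))) →
      spGo [] (l.drop (p+1)) = segsOf l (p :: ps) := by
  intro ps
  induction ps with
  | nil =>
    intro p _ hinv
    have hfree : ∀ x ∈ l.drop (p+1), mk' x = false := by
      apply drop_free_of_no_pos
      intro j hj1 hj2
      by_cases hmk : mk' (l.getD j "") = true
      · have : j ∈ ([] : List Nat) := (hinv j hj1).2 ⟨hj2, hmk⟩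
        simp at this
      · simpa using hmk
    rw [spGo_nomark _ hfree []]
    simp only [segsOf, gpSeg_tail]
    simp
  | cons q ps' ih =>
    intro p hsort hinv
    have hpq : p < q := (List.pairwise_cons.1 hsort).1 q (List.mem_cons_self)
    have hq : q < l.length ∧ mk' (l.getD q "") = true :=
      (hinv q hpq).1 (List.mem_cons_self)
    obtain ⟨hqlen, hqmk⟩ := hq
    have hqget : mk' (l[q]) = true := by rw [← mk_getD l q hqlen]; exact hqmk
    have htail_sorted : (q :: ps').Pairwise (· < ·) := (List.pairwise_cons.1 hsort).2
    have hdecomp : l.drop (p+1) =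
        ((l.drop (p+1)).take (q - (p+1))) ++ l[q] :: l.drop (q+1) := by
      conv_lhs => rw [← List.take_append_drop (q - (p+1)) (l.drop (p+1))]
      congr 1
      rw [List.drop_drop]
      have hq' : p + 1 + (q - (p+1)) = q := by omega
      rw [hq', List.drop_eq_getElem_cons hqlen]
    have hfree : ∀ x ∈ (l.drop (p+1)).take (q - (p+1)), mk' x = false := by
      intro x hx
      obtain ⟨j, hj1, hj2, hjl, rfl⟩ := mem_drop_take_idx l (p+1) (q - (p+1)) x hx
      by_cases hmk : mk' (l[j]'hjl) = true
      · exfalso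
        have hjq : j < q := by omega
        have hjmem : j ∈ q :: ps' :=
          (hinv j (by omega)).2 ⟨hjl, by rw [mk_getD l j hjl]; exact hmk⟩
        rcases List.mem_cons.1 hjmem with rfl | hjmem'
        · omega
        · have := (List.pairwise_cons.1 htail_sorted).1 _ hjmem'
          omega
      · simpa using hmk
    rw [hdecomp, spGo_split _ hfree _ hqget]
    have hinv' : ∀ j, q < j → (j ∈ ps' ↔ (j < l.length ∧ mk' (l.getD j "") = true)) := by
      intro j hj
      constructor
      · intro hmem
        exact (hinv j (by omega)).1 (List.mem_cons_of_mem _ hmem)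
      · intro hcond
        have hjm : j ∈ q :: ps' := (hinv j (by omega)).2 hcond
        rcases List.mem_cons.1 hjm with rfl | h
        · omega
        · exact h
    rw [ih q htail_sorted hinv']
    simp only [segsOf]
    congr 1
    rw [gpSeg_eq l (p+1) q (by omega)]
    simp

-- A's while-True loop computes segsOf
theorem gpLoop_eq (l : List String) (idx : List Nat) :
    ∀ (fuel i : Nat) (acc : List (List String)),
      i + 1 < idx.length → idx.length - (i+1) ≤ fuel →
      gpLoop l idx fuel i (i+1) acc = acc ++ segsOf l (idx.drop i) := by
  intro fuel
  induction fuel with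
  | zero => intro i acc h1 h2; omega
  | succ fuel ih =>
    intro i acc h1 _
    have hi : i < idx.length := by omega
    have hdi : idx.drop i = idx[i] :: idx.drop (i+1) := List.drop_eq_getElem_cons hi
    have hdi1 : idx.drop (i+1) = idx[i+1] :: idx.drop (i+2) := List.drop_eq_getElem_cons h1
    have hgd_i : idx.getD i 0 = idx[i] := by
      simp [List.getD, List.getElem?_eq_getElem hi]
    have hgd_j : idx.getD (i+1) 0 = idx[i+1] := by
      simp [List.getD, List.getElem?_eq_getElem h1]
    simp only [gpLoop, hgd_i, hgd_j]
    by_cases hlast : i + 1 = idx.length - 1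
    · have hb : (i+1 == idx.length - 1) = true := by simp [hlast]
      rw [if_pos hb]
      have hdrop2 : idx.drop (i+2) = [] := by
        apply List.drop_eq_nil_of_le; omega
      rw [hdi, hdi1, hdrop2]
      simp [segsOf]
    · have hb : (i+1 == idx.length - 1) = false := by simp [hlast]
      rw [if_neg (by simp [hb])]
      have h1' : (i+1) + 1 < idx.length := by omega
      rw [ih (i+1) _ h1' (by omega)]
      rw [hdi, hdi1]
      show acc ++ [gpSeg l (idx[i] + 1) idx[i+1]] ++ segsOf l (idx[i+1] :: idx.drop (i+2))
          = acc ++ segsOf l (idx[i] :: idx[i+1] :: idx.drop (i+2))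
      simp only [segsOf]
      rw [List.append_assoc]
      rfl

-- the len(indices)==1 branch of A builds lines[1:]
theorem enum_fold_tail (x : String) (xs : List String) :
    (PySem.List.enumerate (x :: xs)).foldl
      (fun acc p => if p.1 ≠ 0 then acc ++ [p.2] else acc) [] = xs := by
  rw [PySem.List.enumerate_cons, List.foldl_cons]
  have h0 : (if ((0:Int), x).1 ≠ 0 then ([] : List String) ++ [((0:Int), x).2] else []) = [] := by
    simp
  rw [h0]
  have hgen : ∀ (ys : List String) (s : Int), 1 ≤ s → ∀ (acc : List String),
      (PySem.List.enumerate ys s).foldl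
        (fun acc p => if p.1 ≠ 0 then acc ++ [p.2] else acc) acc = acc ++ ys := by
    intro ys
    induction ys with
    | nil => intro s _ acc; simp [PySem.List.enumerate_nil]
    | cons y ys ih =>
      intro s hs acc
      rw [PySem.List.enumerate_cons]
      simp only [List.foldl_cons]
      rw [if_pos (by omega)]
      rw [ih (s+1) (by omega)]
      simp
  simpa using hgen xs (0+1) (by norm_num) []

-- take p is marker-free when mposR l has no position below p
theorem take_free (l : List String) (p : Nat)
    (h : ∀ j ∈ mposR l, p ≤ j) :
    ∀ x ∈ l.take p, mk' x = false := by
  intro x hx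
  obtain ⟨j, _, hj2, hjl, rfl⟩ := mem_drop_take_idx l 0 p x (by simpa using hx)
  by_cases hmk : mk' (l[j]'hjl) = true
  · exfalso
    have := h j (marker_pos l j hjl hmk)
    omega
  · simpa using hmk

-- B on the one-marker inputs: a single block, the content after the marker
theorem alt_single (l : List String) (p : Nat)
    (h : mposR l = [p]) :
    get_patches_alt l = [l.drop (p+1)] := by
  have hpmem : p ∈ mposR l := by rw [h]; exact List.mem_cons_self
  obtain ⟨hplen, hpmk⟩ := (mpos_mem l p).1 hpmem
  have hpget : mk' (l[p]) = true := by rw [← mk_getD l p hplen]; exact hpmk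
  have hfree : ∀ x ∈ l.take p, mk' x = false := by
    apply take_free
    intro j hj
    rw [h] at hj
    simp at hj
    omega
  rw [alt_main l p hplen hfree hpget]
  have hfree2 : ∀ x ∈ l.drop (p+1), mk' x = false := by
    apply drop_free_of_no_pos
    intro j hj1 hj2
    by_cases hmk : mk' (l.getD j "") = true
    · exfalso
      have : j ∈ mposR l := (mpos_mem l j).2 ⟨hj2, hmk⟩
      rw [h] at this
      simp at this
      omega
    · simpa using hmk
  rw [spGo_nomark _ hfree2 []]
  simp

-- ===== VERDICT (by name: the statement is the Claim_ definition above) =====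
theorem get_patches_spec : Claim_unchanged_get_patches := by
  intro l _ hpre hnd
  obtain ⟨hne, s, hsmem, hs⟩ := hpre
  have hmne : mposR l ≠ [] := by
    intro h0
    have := (mpos_nil_iff l).1 h0 s hsmem
    simp [mk', hs] at this
  show get_patches l = get_patches_alt l
  unfold get_patches
  rw [gpIndices_eq_mposR]
  rcases hidx : mposR l with _ | ⟨p, ps⟩
  · exact absurd hidx hmne
  rcases ps with _ | ⟨q, ps'⟩
  · -- exactly one marker; ¬D forces the first line to be the marker
    have hcount : l.countP (fun s => s.toList.head? == some '@') = 1 := by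
      rw [← mpos_length, hidx]; rfl
    have hhead : ∃ s ∈ l.take 1, s.toList.head? = some '@' := by
      by_contra hno
      push Not at hno
      exact hnd ⟨hcount, hno⟩
    obtain ⟨x₀, hx₀mem, hx₀⟩ := hhead
    rcases l with _ | ⟨x, xs⟩
    · simp at hx₀mem
    have hxx : x₀ = x := by simpa using hx₀mem
    subst hxx
    have hmkx : mk' x₀ = true := by simp [mk', hx₀]
    have hp0 : p = 0 ∧ mposR xs = [] := by
      have hsh : mposR (x₀ :: xs) = 0 :: (mposR xs).map (· + 1) := by
        simp [mposR, hmkx]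
      rw [hidx] at hsh
      rcases hmp : mposR xs with _ | ⟨a, as⟩
      · rw [hmp] at hsh; simp at hsh; exact ⟨hsh, rfl⟩
      · rw [hmp] at hsh; simp at hsh
    rw [if_pos (by simp)]
    rw [alt_single (x₀ :: xs) p (by rw [hidx])]
    rw [enum_fold_tail]
    rw [hp0.1]
    rfl
  · -- two or more markers
    rw [if_neg (by simp)]
    have hsort := mpos_sorted l
    rw [hidx] at hsort
    have hinv : ∀ j, p < j → (j ∈ q :: ps' ↔ (j < l.length ∧ mk' (l.getD j "") = true)) := by
      intro j hj
      constructor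
      · intro hmem
        have hjm : j ∈ mposR l := by rw [hidx]; exact List.mem_cons_of_mem _ hmem
        exact (mpos_mem l j).1 hjm
      · intro hcond
        have hjm : j ∈ mposR l := (mpos_mem l j).2 hcond
        rw [hidx] at hjm
        rcases List.mem_cons.1 hjm with rfl | h
        · omega
        · exact h
    have hpmem : p ∈ mposR l := by rw [hidx]; exact List.mem_cons_self
    obtain ⟨hplen, hpmk⟩ := (mpos_mem l p).1 hpmem
    have hpget : mk' (l[p]) = true := by rw [← mk_getD l p hplen]; exact hpmk
    have hfree : ∀ x ∈ l.take p, mk' x = false := by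
      apply take_free
      intro j hj
      rw [hidx] at hj
      rcases List.mem_cons.1 hj with rfl | hj'
      · omega
      · have := (List.pairwise_cons.1 hsort).1 _ hj'
        omega
    rw [gpLoop_eq l (p :: q :: ps') _ 0 [] (by simp) (by simp)]
    rw [alt_main l p hplen hfree hpget]
    rw [main_bridge l (q :: ps') p hsort hinv]
    rfl

theorem get_patches_changed : Claim_changed_get_patches := by
  unfold Claim_changed_get_patches; decide

theorem get_patches_tight : Claim_exact_get_patches := by
  intro l _ hpre hd
  obtain ⟨hne, s, hsmem, hs⟩ := hpre
  obtain ⟨hcount, hhead⟩ := hd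
  have hlen1 : (mposR l).length = 1 := by rw [mpos_length]; exact hcount
  obtain ⟨p, hmp⟩ := List.length_eq_one_iff.1 hlen1
  rcases hl : l with _ | ⟨x, xs⟩
  · subst hl; simp at hsmem
  subst hl
  have hmkx : mk' x = false := by
    have hx := hhead x (by simp)
    by_cases h : mk' x = true
    · exfalso; apply hx; simpa [mk'] using h
    · simpa using h
  have hshape : mposR (x :: xs) = (mposR xs).map (· + 1) := by
    simp [mposR, hmkx]
  have hp1 : 1 ≤ p := by
    rw [hmp] at hshape
    rcases hmx : mposR xs with _ | ⟨p', ps'⟩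
    · rw [hmx] at hshape; simp at hshape
    · rw [hmx] at hshape
      simp at hshape
      omega
  have hplen : p < (x :: xs).length := by
    have hpm : p ∈ mposR (x :: xs) := by rw [hmp]; exact List.mem_cons_self
    exact ((mpos_mem _ p).1 hpm).1
  have hA : get_patches (x :: xs) = [xs] := by
    unfold get_patches
    rw [gpIndices_eq_mposR, hmp]
    rw [if_pos (by simp)]
    rw [enum_fold_tail]
  have hB : get_patches_alt (x :: xs) = [(x :: xs).drop (p+1)] := alt_single _ p hmp
  rw [hA, hB]
  intro hEq
  have hxs : xs = (x :: xs).drop (p+1) := by simpa using hEq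
  have hlen : xs.length = ((x :: xs).drop (p+1)).length := congrArg List.length hxs
  rw [List.length_drop, List.length_cons] at hlen
  rw [List.length_cons] at hplen
  omega
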